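-- pv_equiv track=rewrite | github.com/hffan/yjy015_prj | sys_interface/sys_str.py | find_first_dir
-- ===== SOURCE A (Python) =====
-- def find_first_dir(path):
--     if(''==path.split("/",1)[0]):
--         path=path.split("/",1)[1]
--     else:
--         dir = path.split("/",1)[0]
--         rootpath = path.split("/",1)[1]
--         return rootpath,dir
--     #print (path)
--     return find_first_dir(path)
-- ===== SOURCE B (Python) =====
-- def find_first_dir(path):
--     stripped = path.lstrip("/")
--     dir, rootpath = stripped.split("/", 1)
--     return rootpath, dir
-- ===== Notes on version B (the rewrite author's own statement) =====
-- stated objective: simpler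
-- what changed: Replaces the tail recursion that peels one leading '/' per call and re-splits the string on every step with a single lstrip('/') followed by one split('/',1).
import Mathlib
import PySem

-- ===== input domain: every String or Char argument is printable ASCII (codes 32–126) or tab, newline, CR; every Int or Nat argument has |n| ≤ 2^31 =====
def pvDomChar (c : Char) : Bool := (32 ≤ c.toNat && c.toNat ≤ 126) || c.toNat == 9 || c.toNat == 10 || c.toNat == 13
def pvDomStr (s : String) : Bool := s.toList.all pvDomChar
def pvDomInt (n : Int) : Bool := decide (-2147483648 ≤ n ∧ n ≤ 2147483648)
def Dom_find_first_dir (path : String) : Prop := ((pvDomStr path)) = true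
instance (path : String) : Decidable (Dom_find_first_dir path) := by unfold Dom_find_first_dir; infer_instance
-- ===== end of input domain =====

-- B replaces A's per-'/' tail recursion with a single lstrip('/') + partition('/') (simpler);
-- the proved equivalence is about the RETURN value on inputs where A does not raise IndexError.

-- ===== PORT A =====
-- Python's s.split("/", 1): the part before the first '/', and (if a '/' exists) the rest.
def pvSplitOnce : List Char → List Char × Option (List Char)
  | [] => ([], none)
  | c :: cs =>
    if c = '/' then ([], some cs)
    else
      let p := pvSplitOnce cs
      (c :: p.1, p.2)

-- literal transliteration of A's tail recursion; the `none` branches are where Python raises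
-- IndexError (excluded by Pre_); fuel = |path| + 1 is a totality guard only: each recursive call
-- removes one leading '/', so the fuel is never exhausted.
def find_first_dirAux (fuel : Nat) (l : List Char) : String × String :=
  match fuel with
  | 0 => ("", "")
  | fuel + 1 =>
    let p := pvSplitOnce l
    if p.1 = [] then
      match p.2 with
      | none => ("", "")          -- IndexError in Python (excluded by Pre_)
      | some r => find_first_dirAux fuel r
    else
      match p.2 with
      | none => ("", "")          -- IndexError in Python (excluded by Pre_)
      | some r => (String.ofList r, String.ofList p.1)

def find_first_dir (path : String) : String × String :=
  find_first_dirAux (path.toList.length + 1) path.toList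

-- ===== PORT B =====
-- lstrip("/") then partition("/")
def find_first_dir_alt (path : String) : String × String :=
  let stripped := path.toList.dropWhile (· = '/')
  let dir := stripped.takeWhile (· ≠ '/')
  let rootpath := stripped.drop (dir.length + 1)
  (String.ofList rootpath, String.ofList dir)

-- ===== PRECONDITION & SPEC =====
-- A raises IndexError exactly when, after stripping leading '/', no '/' remains
-- Pre_ admits exactly the inputs on which A returns normally.
def Pre_find_first_dir (path : String) : Prop :=
  '/' ∈ path.toList.dropWhile (· = '/')
instance (path : String) : Decidable (Pre_find_first_dir path) := by
  unfold Pre_find_first_dir; infer_instance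

def pvWitness_find_first_dir : String := "a/b"

def Spec_find_first_dir (path : String) (out : String × String) : Prop := out = find_first_dir_alt path
instance (path : String) (out : String × String) : Decidable (Spec_find_first_dir path out) := by unfold Spec_find_first_dir; infer_instance

-- ===== CLAIM (what is proved, stated in full; the proofs are below) =====
def Claim_equal_find_first_dir : Prop := ∀ (path : String), Dom_find_first_dir path → Pre_find_first_dir path → Spec_find_first_dir path (find_first_dir path)

-- ===== LEMMAS AND PROOFS =====

-- characterisation of split("/",1) when a '/' is present
theorem pvSplitOnce_mem {l : List Char} (h : '/' ∈ l) :
    pvSplitOnce l = (l.takeWhile (· ≠ '/'), some (l.drop ((l.takeWhile (· ≠ '/')).length + 1))) := by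
  induction l with
  | nil => simp at h
  | cons c cs ih =>
    by_cases hc : c = '/'
    · simp [pvSplitOnce, hc]
    · have hmem : '/' ∈ cs := by
        rcases List.mem_cons.mp h with h' | h'
        · exact absurd h'.symm hc
        · exact h'
      simp [pvSplitOnce, hc, ih hmem]

theorem find_first_dirAux_eq (l : List Char) (fuel : Nat) (hf : l.length < fuel)
    (h : '/' ∈ l.dropWhile (· = '/')) :
    find_first_dirAux fuel l =
      (String.ofList ((l.dropWhile (· = '/')).drop (((l.dropWhile (· = '/')).takeWhile (· ≠ '/')).length + 1)),
       String.ofList ((l.dropWhile (· = '/')).takeWhile (· ≠ '/'))) := by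
  induction l generalizing fuel with
  | nil => simp at h
  | cons c cs ih =>
    obtain ⟨f, rfl⟩ : ∃ f, fuel = f + 1 := ⟨fuel - 1, by omega⟩
    by_cases hc : c = '/'
    · have hmem : '/' ∈ cs.dropWhile (· = '/') := by simpa [hc] using h
      have hstep : find_first_dirAux (f + 1) (c :: cs) = find_first_dirAux f cs := by
        simp [find_first_dirAux, pvSplitOnce, hc]
      rw [hstep]
      have := ih f (by simp at hf; omega) hmem
      simpa [hc] using this
    · have hdrop : (c :: cs).dropWhile (· = '/') = c :: cs := by simp [List.dropWhile, hc]
      have hmem : '/' ∈ (c :: cs) := hdrop ▸ h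
      have hs := pvSplitOnce_mem hmem
      have htk : (c :: cs).takeWhile (· ≠ '/') = c :: cs.takeWhile (· ≠ '/') := by
        simp [List.takeWhile, hc]
      rw [show find_first_dirAux (f + 1) (c :: cs) =
            (String.ofList ((c :: cs).drop (((c :: cs).takeWhile (· ≠ '/')).length + 1)),
             String.ofList ((c :: cs).takeWhile (· ≠ '/'))) by
        simp [find_first_dirAux, hs, hc]]
      simp [hdrop]

-- ===== VERDICT (by name: the statements are the Claim_ definitions above) =====
theorem find_first_dir_spec : Claim_equal_find_first_dir := by
  intro path _ hpre
  unfold Spec_find_first_dir find_first_dir find_first_dir_alt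
  exact find_first_dirAux_eq path.toList _ (by omega) hpre
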